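-- pv_equiv track=rewrite | github.com/AlejoPOS/DePollosPosv1 | app.py | _replace_placeholders
-- ===== SOURCE A (Python) =====
-- def _replace_placeholders(sql: str) -> str:
--     """
--     Reemplaza cada '?' por '%s' solo si está fuera de comillas simples o dobles.
--     Además, convierte IFNULL en COALESCE para PostgreSQL.
--     """
--     sql = sql.replace("IFNULL", "COALESCE")  # ✅ PostgreSQL usa COALESCE
--
--     out = []
--     in_sq = False
--     in_dq = False
--     i = 0
--     while i < len(sql):
--         c = sql[i]
--         if c == "'" and not in_dq:
--             in_sq = not in_sq
--             out.append(c)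
--             i += 1
--             continue
--         if c == '"' and not in_sq:
--             in_dq = not in_dq
--             out.append(c)
--             i += 1
--             continue
--         if c == '?' and not in_sq and not in_dq:
--             out.append('%s')
--             i += 1
--             continue
--         out.append(c)
--         i += 1
--     return ''.join(out)
-- ===== SOURCE B (Python) =====
-- def _span_not(s, stops):
--     """Split s into (longest prefix without any char of stops, remainder)."""
--     for k, ch in enumerate(s):
--         if ch in stops:
--             return s[:k], s[k:]
--     return s, ""
--
--
-- def _replace_placeholders(sql: str) -> str:
--     """Chunked rewrite: split sql into normal runs and quoted regions; rewrite
--     '?' -> '%s' only inside normal runs, copy quoted regions verbatim."""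
--     sql = sql.replace("IFNULL", "COALESCE")
--     out = []
--     rest = sql
--     while rest:
--         c, rest = rest[0], rest[1:]
--         if c == "'" or c == '"':
--             body, tail = _span_not(rest, c)
--             if tail:
--                 out.append(c + body + tail[0])
--                 rest = tail[1:]
--             else:
--                 out.append(c + body)
--                 rest = ""
--         else:
--             run, rest = _span_not(rest, "'\"")
--             out.append(''.join('%s' if ch == '?' else ch for ch in c + run))
--     return ''.join(out)
-- ===== Notes on version B (the rewrite author's own statement) =====
-- stated objective: alternative
-- what changed: Replaces A's per-character boolean state machine (in_sq/in_dq flags toggled char by char) with a chunking scan that splits the string into normal runs and whole quoted regions, rewriting placeholders only in normal runs and copying quoted slices verbatim.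
import Mathlib
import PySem

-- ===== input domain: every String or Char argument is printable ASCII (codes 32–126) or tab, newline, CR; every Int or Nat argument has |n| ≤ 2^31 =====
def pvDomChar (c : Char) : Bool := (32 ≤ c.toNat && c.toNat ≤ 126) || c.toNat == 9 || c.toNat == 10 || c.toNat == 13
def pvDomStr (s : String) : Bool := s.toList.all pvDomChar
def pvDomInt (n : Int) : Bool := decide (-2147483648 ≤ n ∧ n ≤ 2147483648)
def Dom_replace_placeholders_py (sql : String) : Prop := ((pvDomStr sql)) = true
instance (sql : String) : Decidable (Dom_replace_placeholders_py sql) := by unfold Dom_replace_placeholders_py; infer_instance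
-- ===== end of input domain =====

-- B replaces A's per-character in_sq/in_dq state machine by a chunking scan
-- over normal runs and whole quoted regions (objective: alternative).

-- ===== PORT A =====
-- A's character loop with the two quote flags, one char at a time.
def pvAGo : List Char → Bool → Bool → List Char
  | [], _, _ => []
  | c :: cs, sq, dq =>
    if c == '\'' && !dq then c :: pvAGo cs (!sq) dq
    else if c == '"' && !sq then c :: pvAGo cs sq (!dq)
    else if c == '?' && !sq && !dq then '%' :: 's' :: pvAGo cs sq dq
    else c :: pvAGo cs sq dq

def replace_placeholders_py (sql : String) : String :=
  String.ofList (pvAGo (PySem.Str.replace sql "IFNULL" "COALESCE").toList false false)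

-- ===== PORT B =====
-- '%s' if ch == '?' else ch
def pvRepl (x : Char) : List Char := if x == '?' then ['%', 's'] else [x]

-- Source B's chunking loop: _span_not is takeWhile/dropWhile of the stop set.
def pvBGo : List Char → List Char
  | [] => []
  | c :: cs =>
    if c == '\'' || c == '"' then
      -- quoted region: copy verbatim through the matching quote (or to the end)
      match h : cs.dropWhile (fun x => x != c) with
      | [] => c :: cs.takeWhile (fun x => x != c)
      | q :: rest => c :: (cs.takeWhile (fun x => x != c) ++ [q]) ++ pvBGo rest
    else
      -- normal run: rewrite '?' → '%s' throughout
      ((c :: cs.takeWhile (fun x => x != '\'' && x != '"')).flatMap pvRepl)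
        ++ pvBGo (cs.dropWhile (fun x => x != '\'' && x != '"'))
  termination_by l => l.length
  decreasing_by
  · have hl := List.length_dropWhile_le (fun x => x != c) cs
    rw [h] at hl; simp at hl ⊢; omega
  · have hl := List.length_dropWhile_le (fun x => x != '\'' && x != '"') cs
    simp; omega

def replace_placeholders_py_alt (sql : String) : String :=
  String.ofList (pvBGo (PySem.Str.replace sql "IFNULL" "COALESCE").toList)

-- ===== PRECONDITION & SPEC =====
def Spec_replace_placeholders_py (sql : String) (out : String) : Prop := out = replace_placeholders_py_alt sql
instance (sql : String) (out : String) : Decidable (Spec_replace_placeholders_py sql out) := by unfold Spec_replace_placeholders_py; infer_instance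

-- ===== CLAIM (what is proved, stated in full; the proofs are below) =====
def Claim_equal_replace_placeholders_py : Prop := ∀ (sql : String), Dom_replace_placeholders_py sql → Spec_replace_placeholders_py sql (replace_placeholders_py sql)

-- ===== LEMMAS AND PROOFS =====

-- A's single steps on a quote character met outside quotes.
lemma pvAGo_cons_sq (cs : List Char) :
    pvAGo ('\'' :: cs) false false = '\'' :: pvAGo cs true false := by
  simp [pvAGo]

lemma pvAGo_cons_dq (cs : List Char) :
    pvAGo ('"' :: cs) false false = '"' :: pvAGo cs false true := by
  simp [pvAGo]

-- Inside a single-quoted region A copies verbatim until the closing quote.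
lemma pvAGo_sq (cs : List Char) :
    pvAGo cs true false =
      cs.takeWhile (fun x => x != '\'') ++
        (match cs.dropWhile (fun x => x != '\'') with
         | [] => []
         | q :: r => q :: pvAGo r false false) := by
  induction cs with
  | nil => simp [pvAGo]
  | cons c cs ih =>
    by_cases h : c = '\''
    · subst h; simp [pvAGo]
    · have hne : (c == '\'') = false := by simp [h]
      have hb : (c != '\'') = true := by simp [bne, hne]
      simp [pvAGo, hne, hb, ih]

-- Inside a double-quoted region A copies verbatim until the closing quote.
lemma pvAGo_dq (cs : List Char) :
    pvAGo cs false true =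
      cs.takeWhile (fun x => x != '"') ++
        (match cs.dropWhile (fun x => x != '"') with
         | [] => []
         | q :: r => q :: pvAGo r false false) := by
  induction cs with
  | nil => simp [pvAGo]
  | cons c cs ih =>
    by_cases h : c = '"'
    · subst h; simp [pvAGo]
    · have hne : (c == '"') = false := by simp [h]
      have hb : (c != '"') = true := by simp [bne, hne]
      simp [pvAGo, hne, hb, ih]

-- Outside quotes, a non-quote head is rewritten independently of the rest.
lemma pvAGo_normal_cons (c : Char) (cs : List Char)
    (h1 : c ≠ '\'') (h2 : c ≠ '"') :
    pvAGo (c :: cs) false false = pvRepl c ++ pvAGo cs false false := by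
  by_cases hq : c = '?'
  · subst hq; simp [pvAGo, pvRepl]
  · simp [pvAGo, pvRepl, h1, h2, hq]

-- A whole quote-free run is rewritten pointwise.
lemma pvAGo_normal_run (seg cs : List Char)
    (h : ∀ x ∈ seg, x ≠ '\'' ∧ x ≠ '"') :
    pvAGo (seg ++ cs) false false = seg.flatMap pvRepl ++ pvAGo cs false false := by
  induction seg with
  | nil => simp
  | cons a seg ih =>
    have ha := h a (by simp)
    simp only [List.cons_append, List.flatMap_cons]
    rw [pvAGo_normal_cons a _ ha.1 ha.2, ih (fun x hx => h x (by simp [hx]))]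
    simp

-- Main lemma: the chunking scan equals the state machine started outside quotes.
lemma pvBGo_eq_pvAGo (cs : List Char) : pvBGo cs = pvAGo cs false false := by
  induction cs using pvBGo.induct with
  | case1 => simp [pvBGo, pvAGo]
  | case2 c cs hq heq =>
    -- quoted region, unterminated
    rcases (by simpa using hq : c = '\'' ∨ c = '"') with h | h
    · subst h
      rw [pvBGo, pvAGo_cons_sq, pvAGo_sq cs]
      split
      · split
        next h1 => simp [h1]
        next q rest h1 => rw [heq] at h1; cases h1
      · simp_all
    · subst h
      rw [pvBGo, pvAGo_cons_dq, pvAGo_dq cs]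
      split
      · split
        next h1 => simp [h1]
        next q rest h1 => rw [heq] at h1; cases h1
      · simp_all
  | case3 c cs hq q rest heq ih =>
    -- quoted region, terminated at q
    rcases (by simpa using hq : c = '\'' ∨ c = '"') with h | h
    · subst h
      rw [pvBGo, pvAGo_cons_sq, pvAGo_sq cs]
      split <;> (try split) <;> simp_all
    · subst h
      rw [pvBGo, pvAGo_cons_dq, pvAGo_dq cs]
      split <;> (try split) <;> simp_all
  | case4 c cs hq ih =>
    -- normal run
    have hc : c ≠ '\'' ∧ c ≠ '"' := by
      constructor <;> intro h <;> subst h <;> simp at hq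
    rw [pvBGo]
    simp only [hq, Bool.false_eq_true, if_false]
    rw [pvAGo_normal_cons c cs hc.1 hc.2]
    have hsplit : cs = cs.takeWhile (fun x => x != '\'' && x != '"') ++
        cs.dropWhile (fun x => x != '\'' && x != '"') :=
      (List.takeWhile_append_dropWhile).symm
    conv_rhs => rw [hsplit]
    rw [pvAGo_normal_run _ _ (by
      intro x hx
      have := List.mem_takeWhile_imp hx
      simpa using this)]
    simp [pvRepl, ih]

-- ===== VERDICT (by name: the statement is the Claim_ definition above) =====
theorem replace_placeholders_py_spec : Claim_equal_replace_placeholders_py := by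
  intro sql _
  unfold Spec_replace_placeholders_py replace_placeholders_py replace_placeholders_py_alt
  rw [pvBGo_eq_pvAGo]
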